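-- pv_equiv track=rewrite | github.com/modrzejewski/gammcor-integrals | src/integrals/Auto2e/Auto2e.py | RtuvSubroutine
-- ===== SOURCE A (Python) =====
-- def RMatrixDim(n):
--     """ Compute the dimension of Rtuv, 0<=t+u+v<=n. """
--     Idx = 0
--     for v in range(n+1):
--         for u in range(n-v+1):
--             for t in range(n-v-u+1):
--                 Idx += 1
--     return Idx
--
-- def RtuvSubroutine(n):
--     """ Compute the Hermite Coulomb integrals matrix R(t, u, v) for 0<=t+u+v<=n. """
--     Code = ""
--     #
--     # Interchange "RA" and "RB" so that the last write operation
--     # stores the final numbers in "RA", that is, the output of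
--     # the subroutine
--     #
--     RecursionCode = ""
--     if n % 2 == 0:
--         R1, R2 = "RA", "RB"
--     else:
--         R1, R2 = "RB", "RA"
--     for k in range(n+1):
--         if k == 0:
--             RecursionCode += "{ROut}(1) = (-2*p)**{n} * Fm({m})\n".format(n=n,  m=n+1, ROut=R1)
--         else:
--             RecursionCode += "call auto2e_RtuvK_{K}({ROut}, {RIn}, {N}, Fm, X, Y, Z, p)\n".format(K=k, ROut=R1, RIn=R2, N=n-k)
--         R1, R2 = R2, R1
--     if n == 0:
--         RBDeclaration = ""
--     else:
--         RBDeclaration = "real(F64), dimension({RBDim}) :: RB\n".format(RBDim=RMatrixDim(n-1))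
--     Code = """subroutine auto2e_Rtuv_{n}(RA, Fm, p, X, Y, Z)
-- !
-- ! Recursively compute the Hermite Coulomb integrals Rtuv for 0<=t+u+v<={n},
-- ! Eqs. 9.9.18-20 p. 375 in Helgaker's textbook.
-- !
-- ! Code generated automatically.
-- !
-- real(F64), dimension(:), intent(out) :: RA
-- real(F64), dimension(:), intent(in) :: Fm
-- real(F64), intent(in) :: p
-- real(F64), intent(in) :: X
-- real(F64), intent(in) :: Y
-- real(F64), intent(in) :: Z
-- {RB}{RecursionCode}end subroutine auto2e_Rtuv_{n}
-- """.format(n=n, RecursionCode=RecursionCode, RB=RBDeclaration)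
--     return Code
-- ===== SOURCE B (Python) =====
-- def RtuvSubroutine(n):
--     """ Compute the Hermite Coulomb integrals matrix R(t, u, v) for 0<=t+u+v<=n. """
--     lines = []
--     for k in range(n + 1):
--         Out, In = ("RA", "RB") if (n - k) % 2 == 0 else ("RB", "RA")
--         if k == 0:
--             lines.append("{R}(1) = (-2*p)**{n} * Fm({m})\n".format(R=Out, n=n, m=n + 1))
--         else:
--             lines.append("call auto2e_RtuvK_{k}({Out}, {In}, {N}, Fm, X, Y, Z, p)\n".format(
--                 k=k, Out=Out, In=In, N=n - k))
--     RecursionCode = "".join(lines)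
--     if n == 0:
--         RBDeclaration = ""
--     else:
--         # dim of Rtuv for order n-1 is the tetrahedral number n(n+1)(n+2)/6
--         dim = n * (n + 1) * (n + 2) // 6 if n >= 1 else 0
--         RBDeclaration = "real(F64), dimension({d}) :: RB\n".format(d=dim)
--     return """subroutine auto2e_Rtuv_{n}(RA, Fm, p, X, Y, Z)
-- !
-- ! Recursively compute the Hermite Coulomb integrals Rtuv for 0<=t+u+v<={n},
-- ! Eqs. 9.9.18-20 p. 375 in Helgaker's textbook.
-- !
-- ! Code generated automatically.
-- !
-- real(F64), dimension(:), intent(out) :: RA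
-- real(F64), dimension(:), intent(in) :: Fm
-- real(F64), intent(in) :: p
-- real(F64), intent(in) :: X
-- real(F64), intent(in) :: Y
-- real(F64), intent(in) :: Z
-- {RB}{RecursionCode}end subroutine auto2e_Rtuv_{n}
-- """.format(n=n, RecursionCode=RecursionCode, RB=RBDeclaration)
-- ===== Notes on version B (the rewrite author's own statement) =====
-- stated objective: faster
-- what changed: RB's dimension is computed by the closed-form tetrahedral number n*(n+1)*(n+2) over six instead of RMatrixDim's triple nested loop, and the recursion lines pick RA/RB directly from the parity of n-k and are joined from a list, instead of being accumulated with an explicit register-swapping two-variable state.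
import Mathlib
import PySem

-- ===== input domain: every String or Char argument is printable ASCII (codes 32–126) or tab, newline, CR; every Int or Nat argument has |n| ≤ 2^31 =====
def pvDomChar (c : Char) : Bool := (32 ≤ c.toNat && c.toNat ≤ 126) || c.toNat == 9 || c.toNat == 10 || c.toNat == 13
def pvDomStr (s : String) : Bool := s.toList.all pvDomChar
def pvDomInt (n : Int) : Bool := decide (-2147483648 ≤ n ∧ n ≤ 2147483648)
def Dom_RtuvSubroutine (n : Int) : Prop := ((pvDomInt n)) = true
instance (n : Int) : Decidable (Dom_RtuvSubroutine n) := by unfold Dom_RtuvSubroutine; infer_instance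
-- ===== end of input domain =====

/- B replaces the O(n^3) triple-loop RMatrixDim by the closed-form tetrahedral number
   n(n+1)(n+2)//6 and picks the RA/RB registers of each recursion line directly from the
   parity of n-k instead of A's swap-state accumulation; objective: faster (asymptotic). -/


-- ===== PORT A =====
-- helper RMatrixDim of A: triple nested counting loop
def pvRMatrixDim (n : Int) : Int :=
  (PySem.List.pyRange 0 (n + 1) 1).foldl (fun idx v =>
    (PySem.List.pyRange 0 (n - v + 1) 1).foldl (fun idx u =>
      (PySem.List.pyRange 0 (n - v - u + 1) 1).foldl (fun idx _ => idx + 1) idx) idx) 0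

-- A's loop body: state (RecursionCode, R1, R2), appended line, then swap R1, R2
def pvStepA (n : Int) (s : String × String × String) (k : Int) : String × String × String :=
  (if k == 0 then
     s.1 ++ (s.2.1 ++ "(1) = (-2*p)**" ++ PySem.Int.toStr n ++ " * Fm(" ++ PySem.Int.toStr (n + 1) ++ ")\n")
   else
     s.1 ++ ("call auto2e_RtuvK_" ++ PySem.Int.toStr k ++ "(" ++ s.2.1 ++ ", " ++ s.2.2 ++ ", "
       ++ PySem.Int.toStr (n - k) ++ ", Fm, X, Y, Z, p)\n"),
   s.2.2, s.2.1)

def RtuvSubroutine (n : Int) : String :=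
  let init : String × String := if PySem.Int.mod n 2 == 0 then ("RA", "RB") else ("RB", "RA")
  let st := (PySem.List.pyRange 0 (n + 1) 1).foldl (pvStepA n) ("", init)
  let rb := if n == 0 then ""
            else "real(F64), dimension(" ++ PySem.Int.toStr (pvRMatrixDim (n - 1)) ++ ") :: RB\n"
  "subroutine auto2e_Rtuv_" ++ PySem.Int.toStr n ++ "(RA, Fm, p, X, Y, Z)\n!\n! Recursively compute the Hermite Coulomb integrals Rtuv for 0<=t+u+v<=" ++ PySem.Int.toStr n ++ ",\n! Eqs. 9.9.18-20 p. 375 in Helgaker's textbook.\n!\n! Code generated automatically.\n!\nreal(F64), dimension(:), intent(out) :: RA\nreal(F64), dimension(:), intent(in) :: Fm\nreal(F64), intent(in) :: p\nreal(F64), intent(in) :: X\nreal(F64), intent(in) :: Y\nreal(F64), intent(in) :: Z\n"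
    ++ rb ++ st.1 ++ "end subroutine auto2e_Rtuv_" ++ PySem.Int.toStr n ++ "\n"

-- ===== PORT B =====
-- B's register pair for a line: ("RA","RB") if p is even else ("RB","RA")
def pvRegs (p : Int) : String × String :=
  if PySem.Int.mod p 2 == 0 then ("RA", "RB") else ("RB", "RA")

-- B's per-k line: registers chosen from the parity of n - k
def pvLine (n k : Int) : String :=
  let regs := pvRegs (n - k)
  if k == 0 then
    regs.1 ++ "(1) = (-2*p)**" ++ PySem.Int.toStr n ++ " * Fm(" ++ PySem.Int.toStr (n + 1) ++ ")\n"
  else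
    "call auto2e_RtuvK_" ++ PySem.Int.toStr k ++ "(" ++ regs.1 ++ ", " ++ regs.2 ++ ", "
      ++ PySem.Int.toStr (n - k) ++ ", Fm, X, Y, Z, p)\n"

def RtuvSubroutine_alt (n : Int) : String :=
  let lines := (PySem.List.pyRange 0 (n + 1) 1).foldl (fun acc k => acc ++ [pvLine n k]) ([] : List String)
  -- ''.join(lines): empty separator, ported exactly as left-fold string concatenation
  let recCode := lines.foldl (· ++ ·) ""
  let rb := if n == 0 then ""
            else "real(F64), dimension(" ++ PySem.Int.toStr
              (if 1 ≤ n then PySem.Int.floordiv (n * (n + 1) * (n + 2)) 6 else 0) ++ ") :: RB\n"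
  "subroutine auto2e_Rtuv_" ++ PySem.Int.toStr n ++ "(RA, Fm, p, X, Y, Z)\n!\n! Recursively compute the Hermite Coulomb integrals Rtuv for 0<=t+u+v<=" ++ PySem.Int.toStr n ++ ",\n! Eqs. 9.9.18-20 p. 375 in Helgaker's textbook.\n!\n! Code generated automatically.\n!\nreal(F64), dimension(:), intent(out) :: RA\nreal(F64), dimension(:), intent(in) :: Fm\nreal(F64), intent(in) :: p\nreal(F64), intent(in) :: X\nreal(F64), intent(in) :: Y\nreal(F64), intent(in) :: Z\n"
    ++ rb ++ recCode ++ "end subroutine auto2e_Rtuv_" ++ PySem.Int.toStr n ++ "\n"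

-- ===== PRECONDITION & SPEC =====
def Spec_RtuvSubroutine (n : Int) (out : String) : Prop := out = RtuvSubroutine_alt n
instance (n : Int) (out : String) : Decidable (Spec_RtuvSubroutine n out) := by unfold Spec_RtuvSubroutine; infer_instance

-- ===== CLAIM (what is proved, stated in full; the proofs are below) =====
def Claim_equal_RtuvSubroutine : Prop := ∀ (n : Int), Dom_RtuvSubroutine n → Spec_RtuvSubroutine n (RtuvSubroutine n)

-- ===== LEMMAS AND PROOFS =====

set_option maxHeartbeats 1000000

theorem pvRegs_swap (p : Int) : ((pvRegs p).2, (pvRegs p).1) = pvRegs (p - 1) := by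
  rcases Int.emod_two_eq p with h | h
  · have h1 : (p - 1) % 2 = 1 := by omega
    simp [pvRegs, h, h1]
  · have h1 : (p - 1) % 2 = 0 := by omega
    simp [pvRegs, h, h1]

theorem pv_foldl_str_append (l : List String) (a : String) :
    l.foldl (· ++ ·) a = a ++ l.foldl (· ++ ·) "" := by
  induction l generalizing a with
  | nil => simp
  | cons x t ih =>
    simp only [List.foldl_cons]
    rw [ih (a ++ x), ih (("" : String) ++ x)]
    simp [String.append_assoc]

theorem pv_loopA (n : Int) (c : Nat) : ∀ (j : Int), (n + 1 - j).toNat = c → ∀ code : String,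
    ((PySem.List.pyRange j (n + 1) 1).foldl (pvStepA n) (code, pvRegs (n - j))).1
      = code ++ ((PySem.List.pyRange j (n + 1) 1).map (pvLine n)).foldl (· ++ ·) "" := by
  induction c with
  | zero =>
    intro j hj code
    rw [PySem.List.pyRange_one_eq_nil (by omega)]
    simp
  | succ c ih =>
    intro j hj code
    have h1 : (pvStepA n (code, pvRegs (n - j)) j).1 = code ++ pvLine n j := by
      by_cases h : j = 0 <;> simp [pvStepA, pvLine, h]
    have h2 : (pvStepA n (code, pvRegs (n - j)) j).2 = pvRegs (n - (j + 1)) := by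
      show ((pvRegs (n - j)).2, (pvRegs (n - j)).1) = pvRegs (n - (j + 1))
      rw [show n - (j + 1) = n - j - 1 from by ring]
      exact pvRegs_swap (n - j)
    have hstep : pvStepA n (code, pvRegs (n - j)) j = (code ++ pvLine n j, pvRegs (n - (j + 1))) :=
      Prod.ext h1 h2
    rw [PySem.List.pyRange_one_cons (by omega)]
    simp only [List.foldl_cons, List.map_cons]
    rw [hstep, ih (j + 1) (by omega) (code ++ pvLine n j)]
    rw [pv_foldl_str_append ((PySem.List.pyRange (j + 1) (n + 1) 1).map (pvLine n)) (("" : String) ++ pvLine n j)]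
    simp [String.append_assoc]

theorem pv_foldl_inc {α : Type} (l : List α) (c : Int) :
    l.foldl (fun i _ => i + 1) c = c + l.length := by
  induction l generalizing c with
  | nil => simp
  | cons x t ih =>
    simp only [List.foldl_cons, List.length_cons, ih]
    push_cast
    ring

theorem pv_sum_map_add_one (l : List Nat) (f : Nat → Int) :
    (l.map (fun u => f u + 1)).sum = (l.map f).sum + l.length := by
  induction l with
  | nil => simp
  | cons a t ih =>
    simp only [List.map_cons, List.sum_cons, List.length_cons, ih]
    push_cast
    ring

-- closed form of the inner (triangular) sum
theorem pv_tri (K : Nat) :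
    2 * ((List.range (K + 1)).map (fun u : Nat => ((K - u + 1 : Nat) : Int))).sum
      = ((K : Int) + 1) * ((K : Int) + 2) := by
  induction K with
  | zero => decide
  | succ K ih =>
    rw [List.range_succ, List.map_append, List.sum_append]
    rw [show (List.range (K + 1)).map (fun u : Nat => ((K + 1 - u + 1 : Nat) : Int))
        = (List.range (K + 1)).map (fun u : Nat => ((K - u + 1 : Nat) : Int) + 1) from
      List.map_congr_left (fun u hu => by
        rw [List.mem_range] at hu
        omega)]
    rw [pv_sum_map_add_one, List.length_range]
    simp only [List.map_cons, List.map_nil, List.sum_cons, List.sum_nil, Nat.sub_self]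
    push_cast at ih ⊢
    linear_combination ih

-- closed form of the full (tetrahedral) double sum
theorem pv_tetra (M : Nat) :
    6 * ((List.range (M + 1)).map (fun v : Nat =>
          ((List.range (M - v + 1)).map (fun u : Nat => ((M - v - u + 1 : Nat) : Int))).sum)).sum
      = ((M : Int) + 1) * ((M : Int) + 2) * ((M : Int) + 3) := by
  induction M with
  | zero => decide
  | succ M ih =>
    rw [List.range_succ_eq_map]
    simp only [List.map_cons, List.sum_cons, List.map_map]
    have hmap : (List.range (M + 1)).map ((fun v : Nat =>
          ((List.range (M + 1 - v + 1)).map (fun u : Nat => ((M + 1 - v - u + 1 : Nat) : Int))).sum) ∘ Nat.succ)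
        = (List.range (M + 1)).map (fun v : Nat =>
          ((List.range (M - v + 1)).map (fun u : Nat => ((M - v - u + 1 : Nat) : Int))).sum) := by
      refine List.map_congr_left ?_
      intro v hv
      rw [List.mem_range] at hv
      simp only [Function.comp_apply]
      rw [show M + 1 - Nat.succ v + 1 = M - v + 1 from by omega]
      refine congrArg List.sum (List.map_congr_left ?_)
      intro u hu
      congr 1
      omega
    rw [hmap]
    simp only [Nat.sub_zero]
    have h2 := pv_tri (M + 1)
    push_cast at h2 ih ⊢
    linear_combination 3 * h2 + ih

-- RMatrixDim(m) for m < 0 is 0 (all three loop ranges are empty)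
theorem pv_rmatrix_neg (m : Int) (h : m < 0) : pvRMatrixDim m = 0 := by
  unfold pvRMatrixDim
  rw [PySem.List.pyRange_one_eq_nil (by omega)]
  rfl

-- the triple counting loop as a double sum over Nat ranges
theorem pv_rmatrix_sum (M : Nat) : pvRMatrixDim (M : Int)
    = ((List.range (M + 1)).map (fun v : Nat =>
        ((List.range (M - v + 1)).map (fun u : Nat => ((M - v - u + 1 : Nat) : Int))).sum)).sum := by
  unfold pvRMatrixDim
  simp only [PySem.List.pyRange_one, sub_zero, List.foldl_map, zero_add]
  simp only [pv_foldl_inc]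
  simp only [List.length_range]
  simp only [PySem.List.foldl_add]
  simp only [zero_add]
  rw [show ((M : Int) + 1).toNat = M + 1 from by omega]
  refine congrArg List.sum (List.map_congr_left ?_)
  intro v hv
  rw [List.mem_range] at hv
  rw [show ((M : Int) - v + 1).toNat = M - v + 1 from by omega]
  refine congrArg List.sum (List.map_congr_left ?_)
  intro u hu
  rw [List.mem_range] at hu
  congr 1
  omega

-- RMatrixDim(n-1) for n ≥ 1 equals the tetrahedral number n(n+1)(n+2) // 6
theorem pv_rmatrix_closed (n : Int) (h : 1 ≤ n) :
    pvRMatrixDim (n - 1) = PySem.Int.floordiv (n * (n + 1) * (n + 2)) 6 := by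
  have hM : n - 1 = (((n - 1).toNat : Nat) : Int) := by omega
  rw [hM, pv_rmatrix_sum]
  have h6 := pv_tetra (n - 1).toNat
  have e1 : (((n - 1).toNat : Nat) : Int) = n - 1 := by omega
  rw [e1] at h6
  have hprod : n * (n + 1) * (n + 2)
      = 6 * ((List.range ((n - 1).toNat + 1)).map (fun v : Nat =>
          ((List.range ((n - 1).toNat - v + 1)).map
            (fun u : Nat => (((n - 1).toNat - v - u + 1 : Nat) : Int))).sum)).sum := by
    rw [h6]; ring
  rw [PySem.Int.floordiv_eq_ediv_of_pos (by norm_num), hprod,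
    Int.mul_ediv_cancel_left _ (by norm_num)]

theorem pv_ports_eq (n : Int) : RtuvSubroutine n = RtuvSubroutine_alt n := by
  have hrec := pv_loopA n (n + 1 - 0).toNat 0 rfl ""
  rw [sub_zero] at hrec
  have hinit : (if PySem.Int.mod n 2 == 0 then (("RA" : String), ("RB" : String)) else ("RB", "RA"))
      = pvRegs n := rfl
  have hrb : (if n == 0 then ""
      else "real(F64), dimension(" ++ PySem.Int.toStr (pvRMatrixDim (n - 1)) ++ ") :: RB\n")
      = (if n == 0 then ""
      else "real(F64), dimension(" ++ PySem.Int.toStr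
        (if 1 ≤ n then PySem.Int.floordiv (n * (n + 1) * (n + 2)) 6 else 0) ++ ") :: RB\n") := by
    by_cases h0 : n = 0
    · simp [h0]
    · by_cases h1 : 1 ≤ n
      · rw [pv_rmatrix_closed n h1]; simp [h1]
      · rw [pv_rmatrix_neg (n - 1) (by omega)]; simp [h0, h1]
  simp only [RtuvSubroutine, RtuvSubroutine_alt, PySem.List.foldl_append_singleton_eq_map,
    List.nil_append]
  rw [hinit, hrec, hrb]
  simp [String.append_assoc]

-- ===== VERDICT (by name: the statement is the Claim_ definition above) =====
theorem RtuvSubroutine_spec : Claim_equal_RtuvSubroutine := by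
  intro n _
  unfold Spec_RtuvSubroutine
  exact pv_ports_eq n
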